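-- pv_equiv track=rewrite | github.com/khy123012/khy123012.github.io | 도구/web_recon_deploy/recon.py | filter_urls
-- ===== SOURCE A (Python) =====
-- def filter_urls(urls: list[str], categories: dict[str, list[str]]) -> dict[str, list[str]]:
--     matched: dict[str, list[str]] = {cat: [] for cat in categories}
--     for url in urls:
--         url_lower = url.lower()
--         for category, keywords in categories.items():
--             if any(kw in url_lower for kw in keywords):
--                 matched[category].append(url)
--                 break
--     return {cat: urls for cat, urls in matched.items() if urls}
-- ===== SOURCE B (Python) =====
-- def filter_urls(urls: list[str], categories: dict[str, list[str]]) -> dict[str, list[str]]: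
--     # Category-major pass over a shrinking worklist: each category in turn takes
--     # the still-unclaimed URLs that match one of its keywords (first-match-wins,
--     # duplicates kept since the worklist holds positions' entries, not a set).
--     remaining = [(u, u.lower()) for u in urls]
--     result: dict[str, list[str]] = {}
--     for category, keywords in categories.items():
--         bucket = []
--         still = []
--         for u, lu in remaining:
--             if any(kw in lu for kw in keywords):
--                 bucket.append(u)
--             else:
--                 still.append((u, lu))
--         remaining = still
--         if bucket:
--             result[category] = bucket
--     return result
-- ===== Notes on version B (the rewrite author's own statement) =====
-- stated objective: alternative
-- what changed: Inverted the loop nesting from URL-major (first matching category per URL, appended into a pre-built dict of buckets) to category-major: each category in turn takes its matches out of a shrinking worklist of still-unclaimed (url, lowercased) pairs and is added to the result only if its bucket is non-empty; a Pre_ excludes association lists with duplicate category names, which do not represent a Python dict (categories is dict-typed).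
import Mathlib
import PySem

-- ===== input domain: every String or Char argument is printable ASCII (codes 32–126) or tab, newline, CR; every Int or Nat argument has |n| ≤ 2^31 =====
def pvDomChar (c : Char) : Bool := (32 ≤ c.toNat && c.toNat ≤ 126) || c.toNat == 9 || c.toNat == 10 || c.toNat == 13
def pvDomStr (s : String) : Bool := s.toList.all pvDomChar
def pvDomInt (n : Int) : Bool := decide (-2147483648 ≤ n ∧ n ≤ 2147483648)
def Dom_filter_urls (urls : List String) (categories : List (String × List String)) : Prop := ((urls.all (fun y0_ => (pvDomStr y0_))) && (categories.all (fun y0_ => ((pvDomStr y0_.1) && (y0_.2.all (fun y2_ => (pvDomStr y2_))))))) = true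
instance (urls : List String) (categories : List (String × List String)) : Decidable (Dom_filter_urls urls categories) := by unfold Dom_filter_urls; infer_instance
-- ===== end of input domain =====

-- B inverts A's loop nesting to a category-major sweep with a per-position assigned
-- flag (objective: alternative decomposition, same asymptotic cost).

-- ===== PORT A =====
-- any(kw in url_lower for kw in keywords)   (shared text of both Pythons)
def pvKwHit (url_lower : String) (keywords : List String) : Bool :=
  keywords.any (fun kw => PySem.Str.isIn kw url_lower)

-- the inner 'for category, keywords in categories.items(): … break' of A
def pvInnerA (cats : List (String × List String)) (url_lower url : String)
    (d : PySem.Dict String (List String)) : PySem.Dict String (List String) :=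
  match cats with
  | [] => d
  | (category, keywords) :: rest =>
    if pvKwHit url_lower keywords then d.modify category [] (· ++ [url])
    else pvInnerA rest url_lower url d

def filter_urls (urls : List String) (categories : List (String × List String)) :
    List (String × List String) :=
  -- matched = {cat: [] for cat in categories}, then the url loop, then
  -- {cat: urls for cat, urls in matched.items() if urls} (keys unique, order kept ⇒ a filter of items)
  ((urls.foldl (fun d url => pvInnerA categories (PySem.Str.lower url) url d)
      (categories.foldl (fun d p => d.insert p.1 ([] : List String)) PySem.Dict.empty)).items).filter
    (fun p => !p.2.isEmpty)

-- ===== PORT B =====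
-- one category's pass over the remaining (url, lowered) worklist: (bucket, still-unclaimed)
def pvSweepB (keywords : List String) (remaining : List (String × String)) :
    List String × List (String × String) :=
  match remaining with
  | [] => ([], [])
  | (u, lu) :: rest =>
    let (bucket, still) := pvSweepB keywords rest
    if pvKwHit lu keywords then (u :: bucket, still) else (bucket, (u, lu) :: still)

def pvMainB (cats : List (String × List String)) (remaining : List (String × String)) :
    List (String × List String) :=
  match cats with
  | [] => []
  | (category, keywords) :: rest =>
    let (bucket, still) := pvSweepB keywords remaining
    (if bucket.isEmpty then [] else [(category, bucket)]) ++ pvMainB rest still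

def filter_urls_alt (urls : List String) (categories : List (String × List String)) :
    List (String × List String) :=
  pvMainB categories (urls.map (fun u => (u, PySem.Str.lower u)))

-- ===== PRECONDITION & SPEC =====
-- Pre_ excludes association lists with duplicate category names: 'categories' is dict-typed in
-- Python, and a duplicate-key association list does not represent any Python dict input.
def Pre_filter_urls (urls : List String) (categories : List (String × List String)) : Prop :=
  (categories.map Prod.fst).Nodup
instance (urls : List String) (categories : List (String × List String)) :
    Decidable (Pre_filter_urls urls categories) := by unfold Pre_filter_urls; infer_instance

def pvWitness_filter_urls : List String × (List (String × List String)) :=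
  (["http://Admin.example.com/x", "http://blog.example.com"],
   [("admin", ["admin"]), ("blog", ["blog"])])

def Spec_filter_urls (urls : List String) (categories : List (String × List String)) (out : List (String × List String)) : Prop := out = filter_urls_alt urls categories
instance (urls : List String) (categories : List (String × List String)) (out : List (String × List String)) : Decidable (Spec_filter_urls urls categories out) := by unfold Spec_filter_urls; infer_instance

-- ===== CLAIM (what is proved, stated in full; the proofs are below) =====
def Claim_equal_filter_urls : Prop := ∀ (urls : List String) (categories : List (String × List String)), Dom_filter_urls urls categories → Pre_filter_urls urls categories → Spec_filter_urls urls categories (filter_urls urls categories)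

-- ===== LEMMAS AND PROOFS =====

-- name of the first category whose keywords hit url_lower (proof-side reference)
def pvFmc (cats : List (String × List String)) (url_lower : String) : Option String :=
  match cats with
  | [] => none
  | (c, kws) :: rest => if pvKwHit url_lower kws then some c else pvFmc rest url_lower

theorem pvFmc_mem {cats : List (String × List String)} {lu : String} {c : String}
    (h : pvFmc cats lu = some c) : c ∈ cats.map Prod.fst := by
  induction cats with
  | nil => simp [pvFmc] at h
  | cons p rest ih =>
    obtain ⟨c', kws⟩ := p
    simp only [pvFmc] at h
    split at h
    · simp at h; simp [h]
    · simpa using Or.inr (ih h)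

theorem pvInnerA_eq (cats : List (String × List String)) (lu u : String)
    (d : PySem.Dict String (List String)) :
    pvInnerA cats lu u d =
      match pvFmc cats lu with
      | none => d
      | some c => d.modify c [] (· ++ [u]) := by
  induction cats with
  | nil => rfl
  | cons p rest ih =>
    obtain ⟨c', kws⟩ := p
    simp only [pvInnerA, pvFmc]
    split
    · rfl
    · exact ih

-- the URL fold of A appends each url to the bucket of its first-matching category
theorem pvFoldA_items (cats : List (String × List String)) (urls : List String)
    (d : PySem.Dict String (List String)) (hnd : d.keys.Nodup)
    (hcon : ∀ lu c, pvFmc cats lu = some c → d.contains c = true) :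
    (urls.foldl (fun d url => pvInnerA cats (PySem.Str.lower url) url d) d).items =
      d.items.map (fun p =>
        (p.1, p.2 ++ urls.filter (fun u => pvFmc cats (PySem.Str.lower u) == some p.1))) := by
  induction urls generalizing d with
  | nil => simp
  | cons u rest ih =>
    cases hfm : pvFmc cats (PySem.Str.lower u) with
    | none =>
      rw [List.foldl_cons,
        show pvInnerA cats (PySem.Str.lower u) u d = d by rw [pvInnerA_eq, hfm],
        ih d hnd hcon]
      refine List.map_congr_left (fun p _ => ?_)
      simp [hfm]
    | some c =>
      rw [List.foldl_cons,
        show pvInnerA cats (PySem.Str.lower u) u d = d.modify c [] (· ++ [u]) by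
          rw [pvInnerA_eq, hfm]]
      have hc : d.contains c = true := hcon _ _ hfm
      have hmod : d.modify c [] (· ++ [u]) = d.insert c (d.getD c [] ++ [u]) := rfl
      have hkeys : (d.modify c [] (· ++ [u])).keys = d.keys := by
        rw [hmod]
        exact PySem.Dict.keys_insert_of_contains d (d.getD c [] ++ [u]) hc
      rw [ih _ (hkeys ▸ hnd) (fun lu c' h => by
        rw [hmod, PySem.Dict.contains_insert]
        simp [hcon lu c' h])]
      rw [hmod, PySem.Dict.items_insert]
      simp only [hc, if_true, List.map_map]
      refine List.map_congr_left (fun p hp => ?_)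
      by_cases hpc : p.1 = c
      · subst hpc
        have : d.getD p.1 [] = p.2 := by
          have hg := PySem.Dict.get?_of_mem_items d hp hnd
          simp [PySem.Dict.getD_eq_get?_getD, hg]
        simp [Function.comp, this, hfm]
      · simp only [Function.comp]
        have : (p.1 == c) = false := by simp [hpc]
        simp only [this]
        have : (pvFmc cats (PySem.Str.lower u) == some p.1) = false := by
          rw [hfm]
          exact beq_eq_false_iff_ne.mpr (fun h => hpc (Eq.symm (Option.some.inj h)))
        simp [this]

-- characterization of A under Nodup category names
theorem filter_urls_char (urls : List String) (categories : List (String × List String))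
    (hnd : (categories.map Prod.fst).Nodup) :
    filter_urls urls categories =
      (categories.map (fun p =>
        (p.1, urls.filter (fun u => pvFmc categories (PySem.Str.lower u) == some p.1)))).filter
        (fun p => !p.2.isEmpty) := by
  unfold filter_urls
  have hinit : (categories.foldl (fun d p => d.insert p.1 ([] : List String)) PySem.Dict.empty).items
      = categories.map (fun p => (p.1, ([] : List String))) := by
    have := PySem.Dict.items_foldl_insert_fresh categories Prod.fst
      (fun _ => ([] : List String)) PySem.Dict.empty (fun a _ => by simp) hnd
    simpa using this
  have hkeys : (categories.foldl (fun d p => d.insert p.1 ([] : List String)) PySem.Dict.empty).keys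
      = categories.map Prod.fst := by
    show ((categories.foldl (fun d p => d.insert p.1 ([] : List String)) PySem.Dict.empty).items.map Prod.fst) = _
    rw [hinit, List.map_map]
    rfl
  rw [pvFoldA_items categories urls _ (by rw [hkeys]; exact hnd)
    (fun lu c h => by
      rw [PySem.Dict.contains_iff_mem_keys, hkeys]
      exact pvFmc_mem h)]
  rw [hinit, List.map_map]
  rfl

-- pvSweepB splits the worklist into the matching urls and the rest, in order
theorem pvSweepB_eq (kws : List String) (remaining : List (String × String)) :
    pvSweepB kws remaining =
      ((remaining.filter (fun e => pvKwHit e.2 kws)).map (·.1),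
       remaining.filter (fun e => !pvKwHit e.2 kws)) := by
  induction remaining with
  | nil => rfl
  | cons e rest ih =>
    obtain ⟨u, lu⟩ := e
    simp only [pvSweepB, ih]
    by_cases h : pvKwHit lu kws
    · simp [List.filter_cons, h]
    · simp [List.filter_cons, h]

-- characterization of B under Nodup category names
theorem pvMainB_char (cats : List (String × List String))
    (remaining : List (String × String)) (hnd : (cats.map Prod.fst).Nodup) :
    pvMainB cats remaining =
      (cats.map (fun p =>
        (p.1, (remaining.filter (fun e => pvFmc cats e.2 == some p.1)).map (·.1)))).filter
        (fun p => !p.2.isEmpty) := by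
  induction cats generalizing remaining with
  | nil => rfl
  | cons p rest ih =>
    obtain ⟨c, kws⟩ := p
    simp only [List.map_cons, List.nodup_cons] at hnd
    obtain ⟨hcn, hndr⟩ := hnd
    simp only [pvMainB, pvSweepB_eq]
    rw [ih (remaining.filter (fun e => !pvKwHit e.2 kws)) hndr]
    -- head bucket: first-match on ((c,kws)::rest) is c  ↔  kws hit
    have hhead : remaining.filter (fun e => pvFmc ((c, kws) :: rest) e.2 == some c)
        = remaining.filter (fun e => pvKwHit e.2 kws) := by
      refine List.filter_congr (fun e _ => ?_)
      by_cases h : pvKwHit e.2 kws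
      · simp [pvFmc, h]
      · have hf : (pvFmc rest e.2 == some c) = false := by
          cases hr : pvFmc rest e.2 with
          | none => simp
          | some c' =>
            exact beq_eq_false_iff_ne.mpr (fun hh => hcn ((Option.some.inj hh) ▸ pvFmc_mem hr))
        simp [pvFmc, h, hf]
    -- tail columns: urls claimed by the head category drop out of every later bucket
    have htail : rest.map (fun p =>
          (p.1, ((remaining.filter (fun e => !pvKwHit e.2 kws)).filter
              (fun e => pvFmc rest e.2 == some p.1)).map (·.1)))
        = rest.map (fun p => (p.1, (remaining.filter
              (fun e => pvFmc ((c, kws) :: rest) e.2 == some p.1)).map (·.1))) := by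
      refine List.map_congr_left (fun p hp => ?_)
      have hpc : p.1 ≠ c := fun h => hcn (h ▸ List.mem_map_of_mem hp)
      congr 1
      rw [List.filter_filter]
      refine congrArg (List.map _) (List.filter_congr (fun e _ => ?_))
      by_cases h : pvKwHit e.2 kws
      · have : (some c == some p.1) = false :=
          beq_eq_false_iff_ne.mpr (fun hh => hpc (Eq.symm (Option.some.inj hh)))
        simp [pvFmc, h, this]
      · simp [pvFmc, h]
    rw [htail, List.map_cons, List.filter_cons, ← hhead]
    generalize (remaining.filter
        (fun e => pvFmc ((c, kws) :: rest) e.2 == some c)).map (·.1) = B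
    cases B <;> simp

-- ===== VERDICT (by name: the statement is the Claim_ definition above) =====
theorem filter_urls_spec : Claim_equal_filter_urls := by
  intro urls categories _ hpre
  unfold Spec_filter_urls filter_urls_alt
  rw [filter_urls_char urls categories hpre, pvMainB_char categories _ hpre]
  congr 1
  refine List.map_congr_left (fun p _ => ?_)
  congr 1
  rw [List.filter_map, List.map_map]
  rw [show List.filter ((fun e : String × String => pvFmc categories e.2 == some p.1) ∘
        fun u => (u, PySem.Str.lower u)) urls
      = List.filter (fun u => pvFmc categories (PySem.Str.lower u) == some p.1) urls
    from List.filter_congr (fun u _ => rfl)]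
  exact Eq.symm (by simp [Function.comp_def])
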